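-- pv_equiv track=rewrite | github.com/olivia-rippee/Python-for-Computational-Biology-and-Bioinformatics | Bioinformatics IV - Molecular Evolution/4 Peptide Sequencing.py | ConvertPeptideToVector
-- ===== SOURCE A (Python) =====
-- def ConvertPeptideToVector(Peptide, massTable):
--     ''' Convert a peptide into a peptide vector.
--
--     Input: An amino acid string P.
--     Output: The peptide vector of P (in the form of space-separated integers).'''
--
--     # Calculate prefix masses
--     prefix_masses = []
--     current_mass = 0
--     for amino_acid in Peptide:
--         current_mass += massTable[amino_acid]
--         prefix_masses.append(current_mass)
--
--     total_mass = prefix_masses[-1]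
--
--     # Initialize the peptide vector
--     peptide_vector = [0] * total_mass
--
--     # Set positions corresponding to prefix masses to 1
--     for mass in prefix_masses:
--         peptide_vector[mass - 1] = 1  # -1 because list is 0-indexed
--
--     return ' '.join(map(str, peptide_vector))
-- ===== SOURCE B (Python) =====
-- def ConvertPeptideToVector(Peptide, massTable):
--     ''' Convert a peptide into a peptide vector (space-separated 0/1 string).
--
--     Emits the output residue by residue: each residue of mass m contributes
--     the segment '0 '*(m-1) + '1'; no prefix-mass list, no preallocated
--     vector, no position walk.'''
--     pieces = []
--     for amino_acid in Peptide:
--         pieces.append('0 ' * (massTable[amino_acid] - 1) + '1')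
--     return ' '.join(pieces)
-- ===== Notes on version B (the rewrite author's own statement) =====
-- stated objective: simpler
-- what changed: B drops A's prefix-mass list, preallocated zero vector, scatter writes and str-map entirely: it builds the output in one forward pass, each residue of mass m contributing the segment '0 '*(m-1)+'1', joined with spaces.
-- outside the precondition, e.g. on ConvertPeptideToVector('AB', {'A': 2, 'B': 0}): A returns '0 1', B returns '0 1 1'; on ConvertPeptideToVector('ABC', {'A': 2, 'B': -2, 'C': 3}): A returns '0 1 1', B returns '0 1 1 0 0 1'
import Mathlib
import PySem

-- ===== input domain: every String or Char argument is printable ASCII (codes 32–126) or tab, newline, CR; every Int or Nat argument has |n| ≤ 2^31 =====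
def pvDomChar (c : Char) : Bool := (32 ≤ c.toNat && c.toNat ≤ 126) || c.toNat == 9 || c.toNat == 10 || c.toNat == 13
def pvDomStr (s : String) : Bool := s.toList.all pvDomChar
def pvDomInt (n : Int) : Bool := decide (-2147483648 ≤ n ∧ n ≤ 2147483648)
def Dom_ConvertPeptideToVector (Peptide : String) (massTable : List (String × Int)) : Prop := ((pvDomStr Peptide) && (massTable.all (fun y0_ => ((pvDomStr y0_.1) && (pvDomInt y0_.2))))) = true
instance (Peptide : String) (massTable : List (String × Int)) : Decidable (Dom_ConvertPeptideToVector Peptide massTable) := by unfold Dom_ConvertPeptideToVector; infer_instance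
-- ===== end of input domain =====

-- B builds the output in one forward pass, one segment '0 '*(m-1)+'1' per residue, with no
-- prefix-mass list, no preallocated vector, no scatter (objective: simpler).

-- ===== PORT A =====
def ConvertPeptideToVector (Peptide : String) (massTable : List (String × Int)) : String :=
  -- prefix_masses / current_mass loop
  let pm := Peptide.toList.foldl
    (fun (st : List Int × Int) amino_acid =>
      let cm := st.2 + PySem.Dict.getD (PySem.Dict.ofList massTable) (String.singleton amino_acid) 0
      (st.1 ++ [cm], cm)) ([], 0)
  let prefix_masses := pm.1
  let total_mass := PySem.List.pyGetD prefix_masses (-1) 0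
  -- peptide_vector = [0] * total_mass; then the scatter loop peptide_vector[mass - 1] = 1
  let peptide_vector := prefix_masses.foldl
    (fun v mass => PySem.List.pySetD v (mass - 1) 1)
    (List.replicate total_mass.toNat 0)
  PySem.Str.join " " (peptide_vector.map PySem.Int.toStr)

-- ===== PORT B =====
-- Python's 's * n' on strings (non-positive n gives ''): exact, ported by hand on List Char.
def pvStrMul (cs : List Char) (n : Int) : List Char := (List.replicate n.toNat cs).flatten

def ConvertPeptideToVector_alt (Peptide : String) (massTable : List (String × Int)) : String :=
  let pieces := Peptide.toList.foldl
    (fun (acc : List String) amino_acid =>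
      acc ++ [String.ofList (pvStrMul ['0', ' ']
        (PySem.Dict.getD (PySem.Dict.ofList massTable) (String.singleton amino_acid) 0 - 1) ++ ['1'])]) []
  PySem.Str.join " " pieces

-- ===== PRECONDITION & SPEC =====
-- Pre_ excludes the empty peptide (A raises IndexError) and residues missing from the table
-- (KeyError); it also excludes residues whose table mass is non-positive, where A's
-- negative-index wraparound / duplicate-position overwrite produces an accidental vector
-- (amino-acid masses are positive); see claim.json cites for two such excluded examples.
def Pre_ConvertPeptideToVector (Peptide : String) (massTable : List (String × Int)) : Prop :=
  Peptide.toList ≠ [] ∧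
  (Peptide.toList.all (fun c =>
    massTable.any (fun p => p.1 == String.singleton c) &&
    massTable.all (fun p => !(p.1 == String.singleton c) || 1 ≤ p.2))) = true

instance (Peptide : String) (massTable : List (String × Int)) : Decidable (Pre_ConvertPeptideToVector Peptide massTable) := by
  unfold Pre_ConvertPeptideToVector; infer_instance

def pvWitness_ConvertPeptideToVector : String × (List (String × Int)) :=
  ("AB", [("A", 2), ("B", 3)])

def Spec_ConvertPeptideToVector (Peptide : String) (massTable : List (String × Int)) (out : String) : Prop := out = ConvertPeptideToVector_alt Peptide massTable
instance (Peptide : String) (massTable : List (String × Int)) (out : String) : Decidable (Spec_ConvertPeptideToVector Peptide massTable out) := by unfold Spec_ConvertPeptideToVector; infer_instance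

-- ===== CLAIM (what is proved, stated in full; the proofs are below) =====
def Claim_equal_ConvertPeptideToVector : Prop := ∀ (Peptide : String) (massTable : List (String × Int)), Dom_ConvertPeptideToVector Peptide massTable → Pre_ConvertPeptideToVector Peptide massTable → Spec_ConvertPeptideToVector Peptide massTable (ConvertPeptideToVector Peptide massTable)

-- ===== LEMMAS AND PROOFS =====

/-- Prefix sums of `l` starting from running total `c`. -/
def pvPrefixes (c : Int) : List Int → List Int
  | [] => []
  | m :: r => (c + m) :: pvPrefixes (c + m) r

/-- The segment a residue of mass `m` contributes to the peptide vector. -/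
def pvSeg (m : Int) : List Int := List.replicate (m - 1).toNat 0 ++ [1]

lemma pvGetD_ofList_mem (k : String) : ∀ (mt : List (String × Int)),
    (∃ p ∈ mt, p.1 = k) → (k, PySem.Dict.getD (PySem.Dict.ofList mt) k 0) ∈ mt := by
  intro mt
  induction mt using List.reverseRecOn with
  | nil => rintro ⟨p, hp, -⟩; simp at hp
  | append_singleton mt q ih =>
    intro hex
    have hof : PySem.Dict.ofList (mt ++ [q]) = (PySem.Dict.ofList mt).insert q.1 q.2 := by
      simp [PySem.Dict.ofList, PySem.Dict.update]
    rw [hof, PySem.Dict.getD_insert]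
    by_cases hk : k = q.1
    · simp [hk]
    · simp only [if_neg hk]
      have hex' : ∃ p ∈ mt, p.1 = k := by
        obtain ⟨p, hp, hpk⟩ := hex
        rcases List.mem_append.mp hp with h | h
        · exact ⟨p, h, hpk⟩
        · simp at h; subst h; exact absurd hpk.symm hk
      exact List.mem_append_left _ (ih hex')

lemma pvPrefixes_ne_nil {l : List Int} (h : l ≠ []) (c : Int) : pvPrefixes c l ≠ [] := by
  cases l with
  | nil => exact absurd rfl h
  | cons m r => simp [pvPrefixes]

lemma pvPrefixes_getLast? {l : List Int} (h : l ≠ []) (c : Int) :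
    (pvPrefixes c l).getLast? = some (c + l.sum) := by
  induction l generalizing c with
  | nil => exact absurd rfl h
  | cons m r ih =>
    cases r with
    | nil => simp [pvPrefixes]
    | cons m' r' =>
      rw [show pvPrefixes c (m :: m' :: r') = (c + m) :: pvPrefixes (c + m) (m' :: r') from rfl]
      rw [List.getLast?_cons, ih (by simp) (c + m)]
      simp [add_assoc]

lemma pvSum_nonneg {l : List Int} (h : ∀ m ∈ l, 1 ≤ m) : 0 ≤ l.sum := by
  induction l with
  | nil => simp
  | cons m r ih =>
    simp only [List.sum_cons]
    have := h m (by simp)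
    have := ih (fun x hx => h x (by simp [hx]))
    omega

lemma pvPrefixes_bounds {l : List Int} (h : ∀ m ∈ l, 1 ≤ m) : ∀ (c : Int),
    ∀ p ∈ pvPrefixes c l, c + 1 ≤ p ∧ p ≤ c + l.sum := by
  induction l with
  | nil => intro c p hp; simp [pvPrefixes] at hp
  | cons m r ih =>
    intro c p hp
    have hm : 1 ≤ m := h m (by simp)
    have hr : ∀ x ∈ r, 1 ≤ x := fun x hx => h x (by simp [hx])
    have hrs : 0 ≤ r.sum := pvSum_nonneg hr
    rcases List.mem_cons.mp hp with h' | h'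
    · subst h'; simp only [List.sum_cons]; omega
    · have := ih hr (c + m) p h'
      simp only [List.sum_cons]
      omega

lemma pvSetD_eq_set (v : List Int) (i : Int) (x : Int) (h0 : 0 ≤ i) (h1 : i < v.length) :
    PySem.List.pySetD v i x = v.set i.toNat x := by
  simp [PySem.List.pySetD, PySem.List.pySet?, PySem.List.pyIdx?, h0, h1]

lemma pvScatter : ∀ (l v : List Int), (∀ p ∈ l, 1 ≤ p ∧ p ≤ (v.length : Int)) →
    (l.foldl (fun v m => PySem.List.pySetD v (m - 1) 1) v).length = v.length ∧
    ∀ j, j < v.length →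
      (l.foldl (fun v m => PySem.List.pySetD v (m - 1) 1) v).getD j 0
        = if ((j : Int) + 1) ∈ l then 1 else v.getD j 0 := by
  intro l
  induction l with
  | nil => intro v _; exact ⟨rfl, fun j hj => by simp⟩
  | cons p r ih =>
    intro v hb
    have hp := hb p (by simp)
    have hset : PySem.List.pySetD v (p - 1) 1 = v.set (p-1).toNat 1 :=
      pvSetD_eq_set v (p-1) 1 (by omega) (by omega)
    have hlen : (v.set (p-1).toNat 1).length = v.length := by simp
    have hb' : ∀ q ∈ r, 1 ≤ q ∧ q ≤ ((v.set (p-1).toNat 1).length : Int) := by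
      intro q hq; rw [hlen]; exact hb q (by simp [hq])
    obtain ⟨ihlen, ihget⟩ := ih (v.set (p-1).toNat 1) hb'
    rw [List.foldl_cons, hset]
    refine ⟨by rw [ihlen, hlen], ?_⟩
    intro j hj
    rw [ihget j (by rw [hlen]; exact hj)]
    by_cases hm : ((j : Int) + 1) ∈ r
    · simp [hm]
    · simp only [hm, if_false, List.mem_cons]
      by_cases he : ((j : Int) + 1) = p
      · have : (p - 1).toNat = j := by omega
        simp [he, this, List.getD_eq_getElem?_getD, hj]
      · have hne : (p - 1).toNat ≠ j := by omega
        have hg : (v.set (p-1).toNat 1)[j]? = v[j]? := List.getElem?_set_ne hne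
        rw [List.getD_eq_getElem?_getD, List.getD_eq_getElem?_getD, hg]
        simp [he]

lemma pvListEqOfGetD (l1 l2 : List Int) (hlen : l1.length = l2.length)
    (h : ∀ j, j < l1.length → l1.getD j 0 = l2.getD j 0) : l1 = l2 := by
  apply List.ext_getElem hlen
  intro i h1 h2
  have := h i h1
  rwa [List.getD_eq_getElem _ _ h1, List.getD_eq_getElem _ _ h2] at this

lemma pvScatter_eq (l : List Int) (t : Nat) (hb : ∀ p ∈ l, 1 ≤ p ∧ p ≤ (t : Int)) :
    l.foldl (fun v m => PySem.List.pySetD v (m - 1) 1) (List.replicate t 0)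
      = (List.range t).map (fun (j : Nat) => if ((j : Int) + 1) ∈ l then (1 : Int) else 0) := by
  obtain ⟨hvlen, hvget⟩ := pvScatter l (List.replicate t 0)
    (by intro p hp; simpa using hb p hp)
  simp only [List.length_replicate] at hvlen hvget
  apply pvListEqOfGetD
  · rw [hvlen]; simp
  · intro j hj
    rw [hvlen] at hj
    rw [hvget j hj]
    have hr : (List.replicate t (0:Int)).getD j 0 = 0 := by
      simp [List.getD_eq_getElem?_getD]
    have hmapget : ((List.range t).map
        (fun (j : Nat) => if ((j : Int) + 1) ∈ l then (1 : Int) else 0)).getD j 0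
        = (if ((j : Int) + 1) ∈ l then (1 : Int) else 0) := by
      rw [List.getD_eq_getElem _ _ (by simpa using hj), List.getElem_map, List.getElem_range]
    rw [hr, hmapget]

lemma pvFoldA (cs : List Char) (look : Char → Int) : ∀ (acc : List Int) (c : Int),
    cs.foldl (fun (st : List Int × Int) a => (st.1 ++ [st.2 + look a], st.2 + look a)) (acc, c)
      = (acc ++ pvPrefixes c (cs.map look), c + (cs.map look).sum) := by
  induction cs with
  | nil => intro acc c; simp [pvPrefixes]
  | cons a r ih =>
    intro acc c
    rw [List.foldl_cons, ih]
    simp [pvPrefixes, add_assoc]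

/-- A's indicator vector over positions equals the concatenation of per-residue segments. -/
lemma pvInd_eq_flatMap : ∀ (ms : List Int), (∀ m ∈ ms, 1 ≤ m) → ∀ (c : Int),
    (List.range ms.sum.toNat).map
      (fun (j : Nat) => if (c + (j : Int) + 1) ∈ pvPrefixes c ms then (1 : Int) else 0)
      = ms.flatMap pvSeg := by
  intro ms
  induction ms with
  | nil => intro _ c; simp [pvPrefixes]
  | cons m r ih =>
    intro h c
    have hm : 1 ≤ m := h m (by simp)
    have hr : ∀ x ∈ r, 1 ≤ x := fun x hx => h x (by simp [hx])
    have hrs : 0 ≤ r.sum := pvSum_nonneg hr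
    have hsum : (m :: r).sum.toNat = m.toNat + r.sum.toNat := by
      simp only [List.sum_cons]; omega
    rw [hsum, List.range_add, List.map_append, List.map_map, List.flatMap_cons]
    congr 1
    · -- first block: replicate (m-1) 0 ++ [1]
      apply pvListEqOfGetD
      · simp [pvSeg]; omega
      · intro j hj
        simp only [List.length_map, List.length_range] at hj
        have hjm : (j : Int) < m := by omega
        have hcond : ((c + (j:Int) + 1) ∈ pvPrefixes c (m :: r)) ↔ j = m.toNat - 1 := by
          rw [show pvPrefixes c (m :: r) = (c + m) :: pvPrefixes (c + m) r from rfl]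
          simp only [List.mem_cons]
          constructor
          · rintro (he | hmem)
            · omega
            · have := pvPrefixes_bounds hr (c + m) _ hmem
              omega
          · intro hje; left; omega
        rw [List.getD_eq_getElem _ _ (by simpa using hj), List.getElem_map, List.getElem_range]
        by_cases hje : j = m.toNat - 1
        · rw [if_pos (hcond.mpr hje)]
          rw [List.getD_eq_getElem _ _ (by simp [pvSeg]; omega)]
          have : j = (List.replicate (m-1).toNat (0:Int)).length := by simp; omega
          simp only [pvSeg]
          rw [List.getElem_append_right (by simp; omega)]
          simp
        · rw [if_neg (fun hc => hje (hcond.mp hc))]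
          have hjlt : j < (m-1).toNat := by omega
          rw [List.getD_eq_getElem _ _ (by simp [pvSeg]; omega)]
          simp only [pvSeg]
          rw [List.getElem_append_left (by simpa using hjlt)]
          simp
    · -- remaining blocks: shift by m and use the IH at c + m
      have hrest := ih hr (c + m)
      rw [← hrest]
      apply List.map_congr_left
      intro j hj
      simp only [Function.comp]
      have harg : c + ((m.toNat + j : Nat) : Int) + 1 = (c + m) + (j : Int) + 1 := by
        push_cast; omega
      rw [harg]
      have hhead : ¬ ((c + m) + (j : Int) + 1 = c + m) := by omega
      rw [show pvPrefixes c (m :: r) = (c + m) :: pvPrefixes (c + m) r from rfl]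
      simp only [List.mem_cons]
      by_cases hmem : ((c + m) + (j : Int) + 1) ∈ pvPrefixes (c + m) r
      · rw [if_pos (Or.inr hmem), if_pos hmem]
      · rw [if_neg (by rintro (h' | h'); exact hhead h'; exact hmem h'), if_neg hmem]

/-- join with a nonempty tail peels off the head. -/
lemma pvJoin_cons {s a : List Char} {l : List (List Char)} (h : l ≠ []) :
    PySem.Chars.join s (a :: l) = a ++ s ++ PySem.Chars.join s l := by
  cases l with
  | nil => exact absurd rfl h
  | cons b t => rw [PySem.Chars.join_cons_cons]

lemma pvJoin_append {s : List Char} : ∀ (a b : List (List Char)), a ≠ [] → b ≠ [] →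
    PySem.Chars.join s (a ++ b) = PySem.Chars.join s a ++ s ++ PySem.Chars.join s b := by
  intro a
  induction a with
  | nil => intro b h _; exact absurd rfl h
  | cons x t ih =>
    intro b _ hb
    cases t with
    | nil =>
      rw [List.singleton_append, pvJoin_cons hb, PySem.Chars.join_singleton]
    | cons y r =>
      rw [List.cons_append, pvJoin_cons (by simp), pvJoin_cons (by simp),
        ih b (by simp) hb]
      simp [List.append_assoc]

/-- joining the flattening = joining the per-group joins (all groups nonempty). -/
lemma pvJoin_flatten {s : List Char} : ∀ (ls : List (List (List Char))),
    (∀ g ∈ ls, g ≠ []) →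
    PySem.Chars.join s ls.flatten = PySem.Chars.join s (ls.map (PySem.Chars.join s)) := by
  intro ls
  induction ls with
  | nil => intro _; rfl
  | cons g t ih =>
    intro h
    have hg : g ≠ [] := h g (by simp)
    rw [List.flatten_cons, List.map_cons]
    cases t with
    | nil => simp [PySem.Chars.join_singleton]
    | cons g' t' =>
      have ht : (g' :: t').flatten ≠ [] := by
        have := h g' (by simp)
        rw [List.flatten_cons]
        intro hc
        exact this (List.append_eq_nil_iff.mp hc).1
      rw [pvJoin_append g _ hg ht, pvJoin_cons (by simp),
        ih (fun x hx => h x (by simp [hx]))]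

/-- the join of a segment's bit strings is the piece '0 '*(k)+'1'. -/
lemma pvJoin_seg : ∀ (k : Nat),
    PySem.Chars.join [' '] (List.replicate k ['0'] ++ [['1']])
      = (List.replicate k ['0', ' ']).flatten ++ ['1'] := by
  intro k
  induction k with
  | zero => simp [PySem.Chars.join_singleton]
  | succ n ih =>
    rw [List.replicate_succ, List.cons_append, pvJoin_cons (by simp), ih,
      List.replicate_succ, List.flatten_cons]
    simp

-- ===== VERDICT (by name: the statement is the Claim_ definition above) =====
theorem ConvertPeptideToVector_spec : Claim_equal_ConvertPeptideToVector := by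
  unfold Claim_equal_ConvertPeptideToVector
  intro P mt _ hpre
  unfold Spec_ConvertPeptideToVector ConvertPeptideToVector ConvertPeptideToVector_alt
  obtain ⟨hne, hmem'⟩ := hpre
  set look : Char → Int :=
    fun a => PySem.Dict.getD (PySem.Dict.ofList mt) (String.singleton a) 0 with hlook
  set ms : List Int := P.toList.map look with hms
  -- residue masses are all positive
  have hms1 : ∀ m ∈ ms, 1 ≤ m := by
    intro m hm
    rw [hms] at hm
    obtain ⟨a, ha, rfl⟩ := List.mem_map.mp hm
    have := List.all_eq_true.mp hmem' a ha
    simp only [Bool.and_eq_true, List.any_eq_true, List.all_eq_true, Bool.or_eq_true,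
      Bool.not_eq_eq_eq_not, Bool.not_true, beq_iff_eq, beq_eq_false_iff_ne,
      decide_eq_true_eq] at this
    obtain ⟨hex, hall⟩ := this
    have hmm := pvGetD_ofList_mem (String.singleton a) mt hex
    exact (hall _ hmm).elim (fun h => absurd rfl h) id
  have hmsne : ms ≠ [] := by rw [hms]; simpa using hne
  have hbounds : ∀ p ∈ pvPrefixes 0 ms, 1 ≤ p ∧ p ≤ ms.sum := by
    intro p hp
    have := pvPrefixes_bounds hms1 0 p hp
    omega
  -- A's prefix-mass loop and total mass
  rw [pvFoldA P.toList look [] 0]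
  simp only [List.nil_append]
  rw [← hms]
  have htot : PySem.List.pyGetD (pvPrefixes 0 ms) (-1) 0 = ms.sum := by
    rw [PySem.List.pyGetD_neg_one _ _ (pvPrefixes_ne_nil hmsne 0)]
    have := pvPrefixes_getLast? hmsne 0
    rw [List.getLast?_eq_some_getLast (pvPrefixes_ne_nil hmsne 0)] at this
    have := Option.some_injective _ this
    omega
  rw [htot]
  -- A's scattered vector = the concatenation of per-residue segments
  rw [pvScatter_eq (pvPrefixes 0 ms) ms.sum.toNat
    (by intro p hp; have := hbounds p hp; constructor <;> omega)]
  have hind := pvInd_eq_flatMap ms hms1 0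
  simp only [zero_add] at hind
  rw [hind]
  -- B's loop is a map of pieces
  rw [PySem.List.foldl_append_singleton_eq_map]
  simp only [List.nil_append]
  -- compare the two joins at the character level
  apply String.ext
  have hA : (PySem.Str.join " " ((ms.flatMap pvSeg).map PySem.Int.toStr)).toList
      = PySem.Chars.join [' '] (((ms.flatMap pvSeg).map PySem.Int.toStr).map String.toList) := by
    have := PySem.Str.toList_join " " ((ms.flatMap pvSeg).map PySem.Int.toStr)
    simpa using this
  have hB : (PySem.Str.join " " (P.toList.map (fun amino_acid =>
        String.ofList (pvStrMul ['0', ' '] (look amino_acid - 1) ++ ['1'])))).toList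
      = PySem.Chars.join [' '] ((P.toList.map (fun amino_acid =>
        String.ofList (pvStrMul ['0', ' '] (look amino_acid - 1) ++ ['1']))).map String.toList) := by
    have := PySem.Str.toList_join " " (P.toList.map (fun amino_acid =>
      String.ofList (pvStrMul ['0', ' '] (look amino_acid - 1) ++ ['1'])))
    simpa using this
  rw [hA, hB]
  -- left: group the bit strings by residue and join each group
  have hgrp : ((ms.flatMap pvSeg).map PySem.Int.toStr).map String.toList
      = (ms.map (fun m => (pvSeg m).map (String.toList ∘ PySem.Int.toStr))).flatten := by
    rw [List.map_map, List.map_flatMap, List.flatMap_def, List.map_map]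
  rw [hgrp, pvJoin_flatten _ (by
    intro g hg
    obtain ⟨m, _, rfl⟩ := List.mem_map.mp hg
    simp [pvSeg])]
  simp only [List.map_map]
  apply congrArg
  rw [hms]
  simp only [List.map_map]
  apply List.map_congr_left
  intro a ha
  have hm : 1 ≤ look a := hms1 (look a) (by rw [hms]; exact List.mem_map_of_mem ha)
  -- each group's join is the piece
  have hbits : (pvSeg (look a)).map (String.toList ∘ PySem.Int.toStr)
      = List.replicate (look a - 1).toNat ['0'] ++ [['1']] := by
    simp only [pvSeg, List.map_append, List.map_replicate, List.map_cons, List.map_nil,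
      Function.comp]
    simp
    exact ⟨Or.inr (by decide), by decide⟩
  simp only [Function.comp]
  rw [hbits, pvJoin_seg]
  simp only [String.toList_ofList, pvStrMul]
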